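-- pv_equiv track=rewrite | github.com/Joshua-Sexton/pyaim | rel/x2c/avas/at2.py | str2orblst
-- ===== SOURCE A (Python) =====
-- def find1(s):
--     return [i for i,x in enumerate(bin(s)[2:][::-1]) if x is '1']
--
-- def str2orblst(string, norb):
--     occ = []
--     vir = []
--     occ.extend([x for x in find1(string)])
--     for i in range(norb):
--         if not (string & 1<<i):
--             vir.append(i)
--     return occ, vir
-- ===== SOURCE B (Python) =====
-- def str2orblst(string, norb):
--     occ = []
--     vir = []
--     for i in range(max(norb, string.bit_length())):
--         if (string >> i) & 1:
--             occ.append(i)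
--         elif i < norb:
--             vir.append(i)
--     return occ, vir
-- ===== Notes on version B (the rewrite author's own statement) =====
-- stated objective: simpler
-- what changed: A builds the binary string of the mask with bin(), reverses it and filters '1' characters for occ, then runs a second loop over range(norb) testing mask bits with a fresh 1<<i each iteration for vir; B is one ascending bit-test loop over range(max(norb, bit_length)) that appends each index to occ or vir directly, with no string conversion and no second pass.
-- outside the precondition, e.g. on str2orblst(-5, 3): A returns ([0, 2], [2]), B returns ([0, 1], [2])
import Mathlib
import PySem

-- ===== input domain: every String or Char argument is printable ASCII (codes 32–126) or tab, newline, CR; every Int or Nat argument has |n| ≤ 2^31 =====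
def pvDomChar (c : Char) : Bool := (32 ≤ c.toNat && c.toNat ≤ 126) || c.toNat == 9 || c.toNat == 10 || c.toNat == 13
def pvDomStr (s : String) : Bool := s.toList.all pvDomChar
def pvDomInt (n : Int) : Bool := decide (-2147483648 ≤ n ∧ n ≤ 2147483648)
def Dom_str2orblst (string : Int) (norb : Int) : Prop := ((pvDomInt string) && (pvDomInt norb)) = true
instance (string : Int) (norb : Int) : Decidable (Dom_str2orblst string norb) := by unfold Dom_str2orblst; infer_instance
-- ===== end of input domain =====

-- B replaces A's bin()-string reversal scan plus separate bit-test loop by one ascending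
-- bit-test loop that fills occ and vir together (objective: simpler).


-- ===== PORT A =====
-- binary digits of n, least-significant first (helper for bin(n))
def pvLsbAux (n : Nat) : List Char :=
  if _h : n = 0 then [] else (if n % 2 = 1 then '1' else '0') :: pvLsbAux (n / 2)
decreasing_by exact Nat.div_lt_self (Nat.pos_of_ne_zero _h) (by norm_num)

-- bin(n)[2:] for n ≥ 0: most-significant-first digit string, '0' for 0 (exact)
def pvBinDigits (n : Nat) : List Char := if n = 0 then ['0'] else (pvLsbAux n).reverse

-- find1(s) = [i for i,x in enumerate(bin(s)[2:][::-1]) if x is '1']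
-- bin(s) for s < 0 is '-0b…', so bin(s)[2:] = 'b' ++ digits of |s| (exact port of the slice)
def find1 (s : Int) : List Int :=
  let chars : List Char := if s < 0 then 'b' :: pvBinDigits s.natAbs else pvBinDigits s.natAbs
  ((PySem.List.enumerate chars.reverse 0).filter (fun p => p.2 == '1')).map (fun p => p.1)

def str2orblst (string : Int) (norb : Int) : List Int × List Int :=
  let occ : List Int := ([] : List Int) ++ (find1 string).map (fun x => x)
  -- for i in range(norb): if not (string & 1<<i): vir.append(i)   (i ≥ 0 here, so i.toNat is exact)
  let vir : List Int := (PySem.List.pyRange 0 norb 1).foldl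
    (fun vir i => if PySem.Int.band string (1 <<< i.toNat) = 0 then vir ++ [i] else vir) []
  (occ, vir)

-- ===== PORT B =====
def str2orblst_alt (string : Int) (norb : Int) : List Int × List Int :=
  -- for i in range(max(norb, string.bit_length())): one pass filling occ/vir (i ≥ 0, so i.toNat is exact)
  (PySem.List.pyRange 0 (max norb (PySem.Int.bitLength string : Int)) 1).foldl
    (fun acc i =>
      if PySem.Int.band (string >>> (i.toNat : Int)) 1 ≠ 0 then (acc.1 ++ [i], acc.2)
      else if i < norb then (acc.1, acc.2 ++ [i]) else acc)
    ([], [])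

-- ===== PRECONDITION & SPEC =====
-- Pre_ restricts to nonnegative bitmasks, the function's natural domain: on a negative mask A's
-- occupied list comes from scanning the textual bin() form including its 'b' character while B
-- tests the actual two's-complement bits, and neither behaviour is specified for negative input.
def Pre_str2orblst (string : Int) (norb : Int) : Prop := 0 ≤ string
instance (string : Int) (norb : Int) : Decidable (Pre_str2orblst string norb) := by unfold Pre_str2orblst; infer_instance
def pvWitness_str2orblst : Int × Int := (11, 5)

def Spec_str2orblst (string : Int) (norb : Int) (out : List Int × List Int) : Prop := out = str2orblst_alt string norb
instance (string : Int) (norb : Int) (out : List Int × List Int) : Decidable (Spec_str2orblst string norb out) := by unfold Spec_str2orblst; infer_instance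

-- ===== CLAIM (what is proved, stated in full; the proofs are below) =====
def Claim_equal_str2orblst : Prop := ∀ (string : Int) (norb : Int), Dom_str2orblst string norb → Pre_str2orblst string norb → Spec_str2orblst string norb (str2orblst string norb)

-- ===== LEMMAS AND PROOFS =====

-- the occupied indices of m starting at offset s, the shape both sides reduce to
def pvBits (s : Int) (m : Nat) : List Int :=
  if _h : m = 0 then [] else (if m % 2 = 1 then [s] else []) ++ pvBits (s + 1) (m / 2)
decreasing_by exact Nat.div_lt_self (Nat.pos_of_ne_zero _h) (by norm_num)

lemma pvLsbAux_enum (m : Nat) : ∀ s : Int,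
    ((PySem.List.enumerate (pvLsbAux m) s).filter (fun p => p.2 == '1')).map (fun p => p.1)
      = pvBits s m := by
  induction m using Nat.strong_induction_on with
  | _ m ih =>
    intro s
    by_cases h : m = 0
    · simp [h, pvLsbAux, pvBits, PySem.List.enumerate_nil]
    · rw [pvLsbAux, pvBits]
      simp only [h, dif_neg, not_false_iff, PySem.List.enumerate_cons, List.filter_cons]
      rcases Nat.mod_two_eq_zero_or_one m with h2 | h2 <;>
        simp [h2, ih (m / 2) (Nat.div_lt_self (Nat.pos_of_ne_zero h) (by norm_num)) (s + 1)]

lemma pvBits_eq (m : Nat) : ∀ s : Int,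
    pvBits s m
      = ((List.range (pvLsbAux m).length).filter (fun k => m.testBit k)).map (fun k : Nat => s + (k : Int)) := by
  induction m using Nat.strong_induction_on with
  | _ m ih =>
    intro s
    by_cases h : m = 0
    · simp [h, pvBits, pvLsbAux]
    · rw [pvBits, pvLsbAux]
      simp only [h, dif_neg, not_false_iff, List.length_cons]
      rw [List.range_succ_eq_map, List.filter_cons, List.filter_map]
      have hP : (fun k => m.testBit k) ∘ Nat.succ = fun k => (m / 2).testBit k := by
        funext k; simp [Function.comp, Nat.testBit_add_one]
      rw [hP]
      have hmap : List.map (fun k : Nat => s + (k : Int))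
          (List.map Nat.succ (List.filter (fun k => (m / 2).testBit k) (List.range (pvLsbAux (m / 2)).length)))
          = pvBits (s + 1) (m / 2) := by
        rw [List.map_map, ih (m / 2) (Nat.div_lt_self (Nat.pos_of_ne_zero h) (by norm_num)) (s + 1)]
        apply List.map_congr_left
        intro a _
        simp [Function.comp]
        ring
      rcases Nat.mod_two_eq_zero_or_one m with h2 | h2 <;>
        simp [h2, Nat.testBit_zero, List.map_cons, hmap]

-- the digit-list length is exactly Python's bit_length
lemma pvLsbAux_length (m : Nat) : (pvLsbAux m).length = PySem.Int.bitLength (m : Int) := by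
  induction m using Nat.strong_induction_on with
  | _ m ih =>
    by_cases h : m = 0
    · simp [h, pvLsbAux, PySem.Int.bitLength_zero]
    · rw [pvLsbAux, PySem.Int.bitLength_natCast (Nat.pos_of_ne_zero h)]
      simp [h, ih (m / 2) (Nat.div_lt_self (Nat.pos_of_ne_zero h) (by norm_num))]

-- B's bit test, as a testBit
lemma pv_bitcond (m k : Nat) : (PySem.Int.band ((m : Int) >>> ((k : Nat) : Int)) 1 ≠ 0) ↔ m.testBit k := by
  rw [Int.shiftRight_natCast m k,
      show (1 : Int) = ((1 : Nat) : Int) from rfl, PySem.Int.band_natCast]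
  simp only [ne_eq, Nat.cast_eq_zero, Nat.and_one_is_mod, ← Nat.decide_shiftRight_mod_two_eq_one]
  rcases Nat.mod_two_eq_zero_or_one (m >>> k) with h | h <;> simp [h]

-- A's bit test, as a testBit
lemma pv_maskcond (m k : Nat) : (PySem.Int.band (m : Int) ((1 <<< k : Nat) : Int) = 0) ↔ ¬ m.testBit k := by
  rw [PySem.Int.band_natCast, Nat.one_shiftLeft, Nat.and_two_pow]
  cases h : m.testBit k <;> simp

-- bits at or above bit_length are clear, so the filtered range can be cut down
lemma pv_filter_range (m : Nat) (n : Nat) (hn : (pvLsbAux m).length ≤ n) :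
    (List.range n).filter (fun k => m.testBit k)
      = (List.range (pvLsbAux m).length).filter (fun k => m.testBit k) := by
  set L := (pvLsbAux m).length with hL
  rw [show n = L + (n - L) by omega, List.range_add, List.filter_append, List.filter_map]
  have : List.filter ((fun k => m.testBit k) ∘ (fun j => L + j)) (List.range (n - L)) = [] := by
    apply List.filter_eq_nil_iff.mpr
    intro j _
    have hm : m < 2 ^ (L + j) := by
      calc m < 2 ^ L := by
              have := PySem.Int.lt_two_pow_bitLength (m : Int)
              simpa [← pvLsbAux_length m] using this
        _ ≤ 2 ^ (L + j) := Nat.pow_le_pow_right (by norm_num) (by omega)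
    simp [Function.comp, Nat.testBit_lt_two_pow hm]
  simp [this]

-- ===== VERDICT (by name: the statement is the Claim_ definition above) =====
theorem str2orblst_spec : Claim_equal_str2orblst := by
  intro string norb _hdom hpre
  unfold Spec_str2orblst
  obtain ⟨m, rfl⟩ : ∃ m : Nat, string = (m : Int) :=
    ⟨string.toNat, (Int.toNat_of_nonneg hpre).symm⟩
  unfold str2orblst str2orblst_alt
  -- split B's single loop into its two independent accumulators
  rw [show (fun (acc : List Int × List Int) (i : Int) =>
        if PySem.Int.band ((m : Int) >>> (i.toNat : Int)) 1 ≠ 0 then (acc.1 ++ [i], acc.2)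
        else if i < norb then (acc.1, acc.2 ++ [i]) else acc)
      = fun (acc : List Int × List Int) (i : Int) =>
        (if PySem.Int.band ((m : Int) >>> (i.toNat : Int)) 1 ≠ 0 then acc.1 ++ [i] else acc.1,
         if ¬ PySem.Int.band ((m : Int) >>> (i.toNat : Int)) 1 ≠ 0 ∧ i < norb then acc.2 ++ [i] else acc.2) by
      funext acc i
      split_ifs <;> (try rfl) <;> tauto,
    PySem.List.foldl_prod_mk
      (f := fun (o : List Int) (i : Int) =>
        if PySem.Int.band ((m : Int) >>> (i.toNat : Int)) 1 ≠ 0 then o ++ [i] else o)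
      (g := fun (v : List Int) (i : Int) =>
        if ¬ PySem.Int.band ((m : Int) >>> (i.toNat : Int)) 1 ≠ 0 ∧ i < norb then v ++ [i] else v),
    PySem.List.foldl_append_ite_eq_filter
      (p := fun i : Int => PySem.Int.band ((m : Int) >>> (i.toNat : Int)) 1 ≠ 0),
    PySem.List.foldl_append_ite_eq_filter
      (p := fun i : Int => ¬ PySem.Int.band ((m : Int) >>> (i.toNat : Int)) 1 ≠ 0 ∧ i < norb),
    PySem.List.foldl_append_ite_eq_filter
      (p := fun i : Int => PySem.Int.band (m : Int) (1 <<< i.toNat) = 0)]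
  refine Prod.ext ?_ ?_
  · -- occupied lists: both sides are the set bits of m, listed in ascending order
    show ([] : List Int) ++ (find1 (m : Int)).map (fun x => x) = _
    simp only [List.nil_append, List.map_id']
    have hA : find1 (m : Int)
        = ((List.range (pvLsbAux m).length).filter (fun k => m.testBit k)).map
            (fun k : Nat => (0 : Int) + (k : Int)) := by
      unfold find1
      rw [if_neg (not_lt.mpr (Int.natCast_nonneg m)), Int.natAbs_natCast]
      by_cases hm : m = 0
      · simp [hm, pvBinDigits, pvLsbAux, PySem.List.enumerate_cons, PySem.List.enumerate_nil]
      · rw [pvBinDigits, if_neg hm]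
        simp only [List.reverse_reverse]
        rw [pvLsbAux_enum m 0, pvBits_eq m 0]
    rw [hA, PySem.List.pyRange_one, List.filter_map,
        List.filter_congr (l := List.range (max norb (PySem.Int.bitLength (m : Int) : Int) - 0).toNat)
          (fun k _ => show ((fun x : Int => decide (PySem.Int.band ((m : Int) >>> (x.toNat : Int)) 1 ≠ 0)) ∘
              (fun k : Nat => (0 : Int) + (k : Int))) k = (fun k : Nat => m.testBit k) k by
            simp only [Function.comp, zero_add, Int.toNat_natCast]
            rcases hb : m.testBit k with _ | _
            · exact decide_eq_false (fun hc => absurd ((pv_bitcond m k).mp hc) (by simp [hb]))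
            · exact decide_eq_true ((pv_bitcond m k).mpr hb)),
        pv_filter_range m (max norb (PySem.Int.bitLength (m : Int) : Int) - 0).toNat (by
          rw [pvLsbAux_length m]
          omega)]
  · -- virtual lists: clear bits below norb, in ascending order
    show ([] : List Int) ++ _ = ([] : List Int) ++ _
    simp only [List.nil_append]
    set T : Int := max norb (PySem.Int.bitLength (m : Int) : Int) with hT
    by_cases hn : norb ≤ 0
    · rw [PySem.List.pyRange_one_eq_nil hn, List.filter_nil]
      symm
      apply List.filter_eq_nil_iff.mpr
      intro x hx
      have h0 : 0 ≤ x := ((PySem.List.mem_pyRange_one).mp hx).1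
      simp only [decide_eq_true_eq, not_and]
      intro _
      omega
    · rw [not_le] at hn
      rw [PySem.List.pyRange_one_append 0 norb T (le_of_lt hn) (le_max_left _ _),
          List.filter_append,
          show List.filter (fun x : Int => decide (¬ PySem.Int.band ((m : Int) >>> (x.toNat : Int)) 1 ≠ 0 ∧ x < norb))
              (PySem.List.pyRange norb T 1) = [] from
            List.filter_eq_nil_iff.mpr (fun x hx => by
              have h0 : norb ≤ x := ((PySem.List.mem_pyRange_one).mp hx).1
              simp only [decide_eq_true_eq, not_and]
              intro _
              omega),
          List.append_nil]
      apply List.filter_congr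
      intro i hi
      obtain ⟨h0, hlt⟩ := (PySem.List.mem_pyRange_one).mp hi
      obtain ⟨k, rfl⟩ : ∃ k : Nat, i = (k : Int) := ⟨i.toNat, (Int.toNat_of_nonneg h0).symm⟩
      rw [decide_eq_decide, Int.toNat_natCast]
      have hb := pv_bitcond m k
      have hmk := pv_maskcond m k
      constructor
      · exact fun h => ⟨fun hb' => (hmk.mp h) (hb.mp hb'), hlt⟩
      · exact fun h => hmk.mpr (fun hb' => h.1 (hb.mpr hb'))
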